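-- pv_equiv track=rewrite | github.com/kevv87/Astore | main/manejo_txt.py | normalize_list_table_aux2
-- ===== SOURCE A (Python) =====
-- def normalize_list_table_aux2(lista, cont):
--     if cont == len(lista):
--         return []
--     elif lista[cont] == '' or lista[cont] == ' ':
--         return [] + normalize_list_table_aux2(lista, cont+1)
--     elif lista[cont] == '\n' or lista[cont] == ' \n':
--         return [] + normalize_list_table_aux2(lista, cont + 1)
--     elif lista[cont].startswith(' '):
--         if lista[cont].endswith('\n'):
--             return [lista[cont][1:len(lista[cont])-1]] + normalize_list_table_aux2(lista, cont+1)
--         else: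
--             return [lista[cont][1:]] + normalize_list_table_aux2(lista, cont+1)
--     elif lista[cont].endswith('\n'):
--         return [lista[cont][:len(lista[cont])-1]] + normalize_list_table_aux2(lista, cont+1)
--     else:
--         return [lista[cont]] + normalize_list_table_aux2(lista, cont+1)
-- ===== SOURCE B (Python) =====
-- def normalize_list_table_aux2(lista, cont):
--     res = []
--     i = cont
--     while i != len(lista):
--         s = lista[i]
--         t = s[1:] if s.startswith(' ') else s
--         if t.endswith('\n'):
--             t = t[:-1]
--         if t != '':
--             res.append(t)
--         i += 1
--     return res
-- ===== Notes on version B (the rewrite author's own statement) =====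
-- stated objective: simpler
-- what changed: Replaces A's six-branch case-enumeration recursion with an iterative transform-then-filter pass: each string is uniformly normalized (drop one leading space, drop a trailing newline) and kept only if non-empty, accumulated in a result list.
import Mathlib
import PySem

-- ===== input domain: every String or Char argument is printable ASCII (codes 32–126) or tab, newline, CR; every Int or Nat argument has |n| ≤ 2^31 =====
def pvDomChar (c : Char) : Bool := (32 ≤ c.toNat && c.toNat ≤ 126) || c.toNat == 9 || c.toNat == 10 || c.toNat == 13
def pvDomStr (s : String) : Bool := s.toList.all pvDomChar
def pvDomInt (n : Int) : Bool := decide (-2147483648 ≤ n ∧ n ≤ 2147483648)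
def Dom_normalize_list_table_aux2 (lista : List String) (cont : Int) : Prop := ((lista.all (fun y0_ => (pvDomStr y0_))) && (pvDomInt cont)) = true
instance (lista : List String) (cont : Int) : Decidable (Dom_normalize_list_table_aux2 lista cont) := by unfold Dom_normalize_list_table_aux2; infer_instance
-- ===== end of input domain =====

-- B replaces A's six-branch case-enumeration recursion with an iterative uniform
-- normalize-then-filter pass over an index with an accumulator; return values proved equal on Pre_.

-- ===== PORT A =====
-- literal transliteration of A's recursion; the `none` branch of pyGet? is Python's
-- IndexError, excluded by Pre_ below.
def normalize_list_table_aux2 (lista : List String) (cont : Int) : List String :=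
  if cont == (lista.length : Int) then []
  else
    match h : PySem.List.pyGet? lista cont with
    | none => []   -- IndexError in Python (outside Pre_)
    | some s =>
      if s == "" || s == " " then
        [] ++ normalize_list_table_aux2 lista (cont + 1)
      else if s == "\n" || s == " \n" then
        [] ++ normalize_list_table_aux2 lista (cont + 1)
      else if PySem.Str.startswith s " " then
        if PySem.Str.endswith s "\n" then
          [PySem.Str.slice s (some 1) (some ((PySem.Str.len s : Int) - 1))] ++ normalize_list_table_aux2 lista (cont + 1)
        else
          [PySem.Str.slice s (some 1) none] ++ normalize_list_table_aux2 lista (cont + 1)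
      else if PySem.Str.endswith s "\n" then
        [PySem.Str.slice s none (some ((PySem.Str.len s : Int) - 1))] ++ normalize_list_table_aux2 lista (cont + 1)
      else
        [s] ++ normalize_list_table_aux2 lista (cont + 1)
termination_by ((lista.length : Int) - cont).toNat
decreasing_by
  all_goals
    have hin : PySem.Raise.InRange lista.length cont := by
      by_contra hn
      rw [← PySem.List.pyGet?_eq_none_iff (xs := lista)] at hn
      simp [hn] at h
    simp [PySem.Raise.InRange] at hin
    omega

-- ===== PORT B =====
-- B's per-element normalization: t = s[1:] if s.startswith(' ') else s; drop one trailing '\n'.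
def pvNorm (s : String) : String :=
  let t := if PySem.Str.startswith s " " then PySem.Str.slice s (some 1) none else s
  if PySem.Str.endswith t "\n" then PySem.Str.slice t none (some (-1)) else t

-- B's while-loop over index i with accumulator res.
def pvAltGo (lista : List String) (i : Int) (res : List String) : List String :=
  if i == (lista.length : Int) then res
  else
    match h : PySem.List.pyGet? lista i with
    | none => res   -- IndexError in Python (outside Pre_)
    | some s =>
      let t := pvNorm s
      pvAltGo lista (i + 1) (if t == "" then res else res ++ [t])
termination_by ((lista.length : Int) - i).toNat
decreasing_by
  have hin : PySem.Raise.InRange lista.length i := by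
    by_contra hn
    rw [← PySem.List.pyGet?_eq_none_iff (xs := lista)] at hn
    simp [hn] at h
  simp [PySem.Raise.InRange] at hin
  omega

def normalize_list_table_aux2_alt (lista : List String) (cont : Int) : List String :=
  pvAltGo lista cont []

-- ===== PRECONDITION & SPEC =====
-- Pre_: exactly the inputs where Python A returns (any cont outside [-len, len] hits IndexError).
def Pre_normalize_list_table_aux2 (lista : List String) (cont : Int) : Prop :=
  -(lista.length : Int) ≤ cont ∧ cont ≤ (lista.length : Int)
instance (lista : List String) (cont : Int) : Decidable (Pre_normalize_list_table_aux2 lista cont) := by unfold Pre_normalize_list_table_aux2; infer_instance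

def pvWitness_normalize_list_table_aux2 : List String × Int := ([" a\n", "", " ", "x\n", "y"], 0)

def Spec_normalize_list_table_aux2 (lista : List String) (cont : Int) (out : List String) : Prop := out = normalize_list_table_aux2_alt lista cont
instance (lista : List String) (cont : Int) (out : List String) : Decidable (Spec_normalize_list_table_aux2 lista cont out) := by unfold Spec_normalize_list_table_aux2; infer_instance

-- ===== CLAIM (what is proved, stated in full; the proofs are below) =====
def Claim_equal_normalize_list_table_aux2 : Prop := ∀ (lista : List String) (cont : Int), Dom_normalize_list_table_aux2 lista cont → Pre_normalize_list_table_aux2 lista cont → Spec_normalize_list_table_aux2 lista cont (normalize_list_table_aux2 lista cont)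

-- ===== LEMMAS AND PROOFS =====

-- list-level version of B's per-element normalization (proof device only)
def pvNormL (cs : List Char) : List Char :=
  let t := if PySem.Chars.startswith cs [' '] then PySem.List.slice cs (some 1) none else cs
  if PySem.Chars.endswith t ['\n'] then PySem.List.slice t none (some (-1)) else t

lemma pv_startswith_iff (cs : List Char) : PySem.Chars.startswith cs [' '] = true ↔ ∃ v, cs = ' ' :: v := by
  rw [PySem.Chars.startswith_iff]
  exact ⟨fun ⟨t, h⟩ => ⟨t, h.symm⟩, fun ⟨v, h⟩ => ⟨v, h.symm⟩⟩

lemma pv_endswith_iff (cs : List Char) : PySem.Chars.endswith cs ['\n'] = true ↔ ∃ u, cs = u ++ ['\n'] := by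
  rw [PySem.Chars.endswith_iff]
  exact ⟨fun ⟨t, h⟩ => ⟨t, h.symm⟩, fun ⟨u, h⟩ => ⟨u, h.symm⟩⟩

lemma pv_c1 (cs : List Char) (t : String) : (String.ofList cs == t) = (cs == t.toList) := by
  rcases h : cs == t.toList with _ | _
  · simp only [beq_eq_false_iff_ne] at h ⊢
    intro hc; exact h (by rw [← hc]; simp)
  · simp only [beq_iff_eq] at h ⊢; rw [String.ext_iff]; simp [h]

lemma pv_c5 (cs : List Char) : PySem.Str.startswith (String.ofList cs) " " = PySem.Chars.startswith cs [' '] := by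
  rw [PySem.Str.startswith_eq]; simp

lemma pv_c6 (cs : List Char) : PySem.Str.endswith (String.ofList cs) "\n" = PySem.Chars.endswith cs ['\n'] := by
  rw [PySem.Str.endswith_eq]; simp

lemma pv_c7 (cs : List Char) : PySem.Str.len (String.ofList cs) = cs.length := by
  rw [PySem.Str.len_eq]; simp

lemma pv_c8 (cs : List Char) (a b : Option Int) : PySem.Str.slice (String.ofList cs) a b = String.ofList (PySem.List.slice cs a b) := by
  rw [String.ext_iff]; simp

lemma pv_c9 (cs : List Char) : pvNorm (String.ofList cs) = String.ofList (pvNormL cs) := by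
  unfold pvNorm pvNormL
  rw [pv_c5]
  rcases PySem.Chars.startswith cs [' '] with _ | _
  · simp only [if_false, Bool.false_eq_true]
    rw [pv_c6]
    rcases PySem.Chars.endswith cs ['\n'] with _ | _ <;> simp [pv_c8]
  · simp only [if_true]
    rw [pv_c8, pv_c6]
    rcases PySem.Chars.endswith _ ['\n'] with _ | _ <;> simp [pv_c8]

-- A's six branches, on one element (list level), are exactly "normalize, then drop if empty".
lemma pv_stepL (cs : List Char) :
    (if cs == [] || cs == [' '] then ([] : List String)
     else if cs == ['\n'] || cs == [' ', '\n'] then []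
     else if PySem.Chars.startswith cs [' '] then
       if PySem.Chars.endswith cs ['\n'] then
         [String.ofList (PySem.List.slice cs (some 1) (some ((cs.length : Int) - 1)))]
       else [String.ofList (PySem.List.slice cs (some 1) none)]
     else if PySem.Chars.endswith cs ['\n'] then
       [String.ofList (PySem.List.slice cs none (some ((cs.length : Int) - 1)))]
     else [String.ofList cs])
    = (if pvNormL cs == [] then [] else [String.ofList (pvNormL cs)]) := by
  by_cases h0 : cs = [] ∨ cs = [' ']
  · rcases h0 with rfl | rfl <;> decide
  by_cases h1 : cs = ['\n'] ∨ cs = [' ', '\n']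
  · rcases h1 with rfl | rfl <;> decide
  push Not at h0 h1
  rw [if_neg (by simp [h0.1, h0.2]), if_neg (by simp [h1.1, h1.2])]
  by_cases hsw : PySem.Chars.startswith cs [' '] = true
  · obtain ⟨v, rfl⟩ := (pv_startswith_iff cs).1 hsw
    rw [if_pos hsw]
    by_cases hew : PySem.Chars.endswith (' ' :: v) ['\n'] = true
    · obtain ⟨u, hu⟩ := (pv_endswith_iff _).1 hew
      cases u with
      | nil => simp at hu
      | cons c u₂ =>
        rw [List.cons_append] at hu
        injection hu with hc hv
        subst hv
        have hu2 : u₂ ≠ [] := fun h => h1.2 (by rw [h]; rfl)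
        have hlen : (((' ' :: (u₂ ++ ['\n'])).length : Int) - 1) = ((u₂.length + 1 : Nat) : Int) := by
          simp
        have hsl : PySem.List.slice (' ' :: (u₂ ++ ['\n'])) (some ((1 : Nat) : Int)) (some ((u₂.length + 1 : Nat) : Int)) = u₂ := by
          rw [PySem.List.slice_natCast]
          simp [List.take_left' rfl]
        have hnorm : pvNormL (' ' :: (u₂ ++ ['\n'])) = u₂ := by
          rw [pvNormL]
          simp only [hsw, if_true, PySem.List.slice_from_one, List.tail_cons]
          rw [if_pos ((pv_endswith_iff _).2 ⟨u₂, rfl⟩), PySem.List.slice_to_neg_one,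
            List.dropLast_concat]
        rw [if_pos hew, hlen, hnorm, if_neg (by simpa using hu2)]
        congr 1
        rw [String.ext_iff]
        simp only [String.toList_ofList]
        exact_mod_cast hsl
    · rw [if_neg hew]
      have hv : v ≠ [] := fun h => h0.2 (by rw [h])
      have hvn : PySem.Chars.endswith v ['\n'] ≠ true := by
        intro hc
        obtain ⟨u, rfl⟩ := (pv_endswith_iff v).1 hc
        exact hew ((pv_endswith_iff _).2 ⟨' ' :: u, rfl⟩)
      have hnorm : pvNormL (' ' :: v) = v := by
        rw [pvNormL]
        simp only [hsw, if_true, PySem.List.slice_from_one, List.tail_cons]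
        rw [if_neg hvn]
      rw [hnorm, if_neg (by simpa using hv)]
      congr 1
      exact congrArg _ (PySem.List.slice_from_one _)
  · rw [if_neg hsw]
    by_cases hew : PySem.Chars.endswith cs ['\n'] = true
    · obtain ⟨u, rfl⟩ := (pv_endswith_iff _).1 hew
      have hu : u ≠ [] := fun h => h1.1 (by rw [h]; rfl)
      have hlen : (((u ++ ['\n']).length : Int) - 1) = ((u.length : Nat) : Int) := by
        simp
      have hnorm : pvNormL (u ++ ['\n']) = u := by
        rw [pvNormL]
        simp only [hsw, if_false, Bool.false_eq_true]
        rw [if_pos ((pv_endswith_iff _).2 ⟨u, rfl⟩), PySem.List.slice_to_neg_one,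
          List.dropLast_concat]
      rw [if_pos hew, hlen, PySem.List.slice_to_natCast, hnorm, if_neg (by simpa using hu)]
      congr 1
      exact congrArg _ (List.take_left ..)
    · rw [if_neg hew]
      have hnorm : pvNormL cs = cs := by
        rw [pvNormL]
        simp only [hsw, if_false, Bool.false_eq_true]
        rw [if_neg hew]
      rw [hnorm, if_neg (by simpa using h0.1)]

-- A's six branches, on one element (string level).
lemma pv_step (s : String) :
    (if s == "" || s == " " then ([] : List String)
     else if s == "\n" || s == " \n" then []
     else if PySem.Str.startswith s " " then
       if PySem.Str.endswith s "\n" then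
         [PySem.Str.slice s (some 1) (some ((PySem.Str.len s : Int) - 1))]
       else [PySem.Str.slice s (some 1) none]
     else if PySem.Str.endswith s "\n" then
       [PySem.Str.slice s none (some ((PySem.Str.len s : Int) - 1))]
     else [s])
    = (if pvNorm s == "" then [] else [pvNorm s]) := by
  obtain ⟨cs, rfl⟩ : ∃ cs, s = String.ofList cs := ⟨s.toList, String.ofList_toList.symm⟩
  simp only [pv_c1, pv_c5, pv_c6, pv_c7, pv_c8, pv_c9]
  exact pv_stepL cs

-- one step of A, rewritten through pv_step
lemma pv_A_step (lista : List String) (i : Int) (s : String)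
    (hne : (i == (lista.length : Int)) = false) (h : PySem.List.pyGet? lista i = some s) :
    normalize_list_table_aux2 lista i
      = (if pvNorm s == "" then [] else [pvNorm s]) ++ normalize_list_table_aux2 lista (i + 1) := by
  rw [normalize_list_table_aux2, ← pv_step s, if_neg (by simp [hne])]
  split
  · next heq => rw [h] at heq; cases heq
  · next s' heq =>
    rw [h] at heq
    injection heq with hs
    subst hs
    split_ifs <;> simp

lemma pv_A_none (lista : List String) (i : Int)
    (hi : ¬(i == (lista.length : Int)) = true) (h : PySem.List.pyGet? lista i = none) :
    normalize_list_table_aux2 lista i = [] := by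
  rw [normalize_list_table_aux2, if_neg hi]
  split
  · rfl
  · next s' heq => rw [h] at heq; cases heq

lemma pv_go_eq (lista : List String) (i : Int) (res : List String) :
    pvAltGo lista i res = res ++ normalize_list_table_aux2 lista i := by
  induction i, res using pvAltGo.induct lista with
  | case1 i res hi =>
    rw [pvAltGo, normalize_list_table_aux2]
    simp [hi]
  | case2 i res hi h =>
    rw [pv_A_none lista i hi h, pvAltGo, if_neg hi]
    split
    · simp
    · next s' heq => rw [h] at heq; cases heq
  | case3 i res hi s h t ih =>
    rw [pvAltGo, if_neg hi]
    split
    · next heq => rw [h] at heq; cases heq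
    · next s' heq =>
      rw [h] at heq
      injection heq with hs
      subst hs
      show pvAltGo lista (i + 1) (if (t == "") = true then res else res ++ [t]) = _
      rw [show (if (t == "") = true then res else res ++ [t])
            = (if h : (t == "") = true then res else res ++ [t]) by simp]
      rw [ih, pv_A_step lista i s (by simpa using hi) h]
      split_ifs <;> simp [t]

-- ===== VERDICT (by name: the statement is the Claim_ definition above) =====
theorem normalize_list_table_aux2_spec : Claim_equal_normalize_list_table_aux2 := by
  intro lista cont _ _
  unfold Spec_normalize_list_table_aux2 normalize_list_table_aux2_alt
  rw [pv_go_eq]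
  simp
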